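-- pv_equiv track=rewrite | github.com/maci2233/Competitive_programming | CodeForces/B/268b.py | buttons
-- ===== SOURCE A (Python) =====
-- def buttons(n):
--     if n == 1:
--         return 1
--     if n == 2:
--         return 3
--     i = 2
--     tot = n
--     while i < n:
--         tot+=((n-i)*i)+1
--         i+=1
--     return tot+1
-- ===== SOURCE B (Python) =====
-- def buttons(n):
--     # closed form of 1 + n + sum_{i=2}^{n-1} ((n-i)*i + 1)
--     return (n**3 + 5*n) // 6
-- ===== Notes on version B (the rewrite author's own statement) =====
-- stated objective: faster
-- what changed: Replaces the O(n) accumulation loop over i=2..n-1 with the closed-form polynomial (n^3+5*n)//6, derived from the sum formulas for i and i^2.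
-- intended difference: For n < 1 the loop never runs and A returns the leftover n+1, which is not the value of the series; B returns the closed form (n^3+5*n)//6, the natural extension of the intended function (the contest domain is n >= 1, where A and B agree). — e.g. on buttons(0): A returns 1, B returns 0
import Mathlib
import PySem

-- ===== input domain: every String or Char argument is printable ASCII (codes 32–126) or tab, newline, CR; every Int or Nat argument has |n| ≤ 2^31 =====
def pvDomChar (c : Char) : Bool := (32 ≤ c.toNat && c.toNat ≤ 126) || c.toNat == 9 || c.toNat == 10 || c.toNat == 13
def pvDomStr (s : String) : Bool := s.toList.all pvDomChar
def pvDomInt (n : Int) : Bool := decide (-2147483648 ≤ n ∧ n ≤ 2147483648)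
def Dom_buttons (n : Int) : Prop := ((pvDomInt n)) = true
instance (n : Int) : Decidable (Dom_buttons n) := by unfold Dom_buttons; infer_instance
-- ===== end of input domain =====

-- B replaces A's O(n) accumulation loop with the closed-form polynomial (n^3+5*n)//6 (O(1)); for n < 1 B returns the closed form where A returns leftover loop state.

-- ===== PORT A =====
-- the while loop 'i = 2; while i < n: tot += (n-i)*i+1; i += 1' is a fold over range(2, n)
def buttons (n : Int) : Int :=
  if n == 1 then 1
  else if n == 2 then 3
  else ((PySem.List.pyRange 2 n 1).foldl (fun tot i => tot + ((n - i) * i + 1)) n) + 1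

-- ===== PORT B =====
def buttons_alt (n : Int) : Int :=
  PySem.Int.floordiv (n ^ 3 + 5 * n) 6

-- ===== PRECONDITION & SPEC =====
-- For n < 1 the loop never runs and A returns the leftover n+1, which is not the value of the
-- series; B returns the closed form (n^3+5*n)//6, the natural extension of the intended function
-- (the contest domain is n >= 1, where A and B agree).
def D_buttons (n : Int) : Prop := n < 1
instance (n : Int) : Decidable (D_buttons n) := by unfold D_buttons; infer_instance
def Spec_buttons (n : Int) (out : Int) : Prop := ¬ D_buttons n → out = buttons_alt n
instance (n : Int) (out : Int) : Decidable (Spec_buttons n out) := by unfold Spec_buttons; infer_instance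
def pvDiffWitness_buttons : Int := 0
def pvDiffWitnessOut_buttons : Int × Int := (1, 0)

-- ===== CLAIM (what is proved, stated in full; the proofs are below) =====
def Claim_unchanged_buttons : Prop := ∀ (n : Int), Dom_buttons n → Spec_buttons n (buttons n)
def Claim_changed_buttons : Prop := Dom_buttons (pvDiffWitness_buttons) ∧ D_buttons (pvDiffWitness_buttons) ∧ buttons (pvDiffWitness_buttons) = pvDiffWitnessOut_buttons.1 ∧ buttons_alt (pvDiffWitness_buttons) = pvDiffWitnessOut_buttons.2 ∧ pvDiffWitnessOut_buttons.1 ≠ pvDiffWitnessOut_buttons.2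
def Claim_exact_buttons : Prop := ∀ (n : Int), Dom_buttons n → D_buttons n → buttons n ≠ buttons_alt n

-- ===== LEMMAS AND PROOFS =====

-- closed form of A's loop: six times the fold over range(2, 2+k)
theorem buttons_fold_eq (k : Nat) (n : Int) :
    6 * ((PySem.List.pyRange 2 (2 + (k : Int)) 1).foldl (fun tot i => tot + ((n - i) * i + 1)) n)
      = 6 * n + 6 * k + 3 * n * k * (k + 3) - k * (2 * k ^ 2 + 9 * k + 13) := by
  induction k with
  | zero => simp [PySem.List.pyRange_one_eq_nil]
  | succ k ih =>
      have h : (2 : Int) + ((k : Nat) + 1 : Nat) = (2 + (k : Int)) + 1 := by push_cast; ring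
      rw [h, PySem.List.pyRange_one_succ_right (by omega)]
      rw [List.foldl_append]
      simp only [List.foldl_cons, List.foldl_nil]
      rw [mul_add, ih]
      push_cast
      ring

theorem buttons_eq_closed (n : Int) (hn : 1 ≤ n) :
    buttons n = PySem.Int.floordiv (n ^ 3 + 5 * n) 6 := by
  have key : 6 * buttons n = n ^ 3 + 5 * n := by
    unfold buttons
    rcases eq_or_lt_of_le hn with h1 | h1
    · simp [← h1]
    rcases eq_or_lt_of_le (by omega : (2 : Int) ≤ n) with h2 | h2
    · simp [← h2]
    have hne1 : (n == 1) = false := by simp; omega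
    have hne2 : (n == 2) = false := by simp; omega
    rw [hne1, hne2]
    simp only [Bool.false_eq_true, if_false]
    have hfix : 2 + (((n - 2).toNat : Nat) : Int) = n := by omega
    have hfold := buttons_fold_eq (n - 2).toNat n
    rw [hfix] at hfold
    have hc : (((n - 2).toNat : Nat) : Int) = n - 2 := by omega
    rw [hc] at hfold
    rw [mul_add, hfold]
    ring
  rw [← key]
  simp [PySem.Int.floordiv, Int.mul_fdiv_cancel_left _ (by norm_num : (6:Int) ≠ 0)]

theorem buttons_of_lt_one (n : Int) (h : n < 1) : buttons n = n + 1 := by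
  unfold buttons
  have h1 : (n == 1) = false := by simp; omega
  have h2 : (n == 2) = false := by simp; omega
  rw [h1, h2]
  simp only [Bool.false_eq_true, if_false]
  rw [PySem.List.pyRange_one_eq_nil (by omega)]
  simp

-- ===== VERDICT (by name: the statement is the Claim_ definition above) =====
theorem buttons_spec : Claim_unchanged_buttons := by
  intro n _ hD
  unfold D_buttons at hD
  exact buttons_eq_closed n (by omega)

theorem buttons_changed : Claim_changed_buttons := by unfold Claim_changed_buttons; decide

theorem buttons_tight : Claim_exact_buttons := by
  intro n _ hD
  unfold D_buttons at hD
  rw [buttons_of_lt_one n hD]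
  unfold buttons_alt
  have hle : n ^ 3 + 5 * n ≤ 6 * n := by
    by_cases h0 : n = 0
    · subst h0; norm_num
    · nlinarith [mul_nonneg (mul_nonneg (show (0:Int) ≤ -n by omega) (show (0:Int) ≤ -(n-1) by omega)) (show (0:Int) ≤ -(n+1) by omega)]
  have hdm := PySem.Int.floordiv_mul_add_mod (n ^ 3 + 5 * n) 6
  have hm0 : 0 ≤ PySem.Int.mod (n ^ 3 + 5 * n) 6 := by
    have := PySem.Int.mod_eq_emod_of_pos (a := n ^ 3 + 5 * n) (b := 6) (by norm_num)
    rw [this]; exact Int.emod_nonneg _ (by norm_num)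
  have hm6 : PySem.Int.mod (n ^ 3 + 5 * n) 6 < 6 := by
    have := PySem.Int.mod_eq_emod_of_pos (a := n ^ 3 + 5 * n) (b := 6) (by norm_num)
    rw [this]; exact Int.emod_lt_of_pos _ (by norm_num)
  intro heq
  -- from heq : n + 1 = floordiv …, with hdm, bounds contradict hle
  omega
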